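-- pv_equiv track=rewrite | github.com/Hujary/anonymizer | src/validation/postcode.py | _normalize_context_and_span
-- ===== SOURCE A (Python) =====
-- from typing import Set, Tuple
--
-- def _normalize_context_and_span(
--     context: str,
--     rel_start: int,
--     rel_end: int,
-- ) -> Tuple[str, int, int]:
--     if rel_start < 0 or rel_end < rel_start or rel_end > len(context):
--         raise ValueError("Ungültige relativen Span-Positionen für den Kontext.")
--
--     out_chars: list[str] = []
--     norm_start = None
--     norm_end = None
--
--     i = 0
--     out_len = 0
--
--     while i < len(context):
--         if i == rel_start:
--             norm_start = out_len
--         if i == rel_end: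
--             norm_end = out_len
--
--         ch = context[i]
--
--         if ch.isspace():
--             j = i
--             while j < len(context) and context[j].isspace():
--                 if j == rel_start and norm_start is None:
--                     norm_start = out_len
--                 if j == rel_end and norm_end is None:
--                     norm_end = out_len
--                 j += 1
--
--             if out_chars and out_chars[-1] != " ":
--                 out_chars.append(" ")
--                 out_len += 1
--
--             i = j
--             continue
--
--         out_chars.append(ch)
--         out_len += 1
--         i += 1
--
--     if norm_start is None:
--         norm_start = out_len if rel_start == len(context) else 0
--     if norm_end is None:
--         norm_end = out_len if rel_end == len(context) else norm_start
--
--     normalized = "".join(out_chars).strip()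
--
--     leading_trim = len("".join(out_chars)) - len("".join(out_chars).lstrip(" "))
--     trailing_trimmed = "".join(out_chars).strip(" ")
--
--     norm_start = max(0, norm_start - leading_trim)
--     norm_end = max(norm_start, norm_end - leading_trim)
--
--     if norm_end > len(trailing_trimmed):
--         norm_end = len(trailing_trimmed)
--     if norm_start > len(trailing_trimmed):
--         norm_start = len(trailing_trimmed)
--
--     return trailing_trimmed, norm_start, norm_end
-- ===== SOURCE B (Python) =====
-- def _normalize_context_and_span(context, rel_start, rel_end):
--     if rel_start < 0 or rel_end < rel_start or rel_end > len(context):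
--         raise ValueError("Ungültige relativen Span-Positionen für den Kontext.")
--
--     # Single pass: build the collapsed text and a position map in one go.
--     # pos_map[i] = normalized length accumulated just before original index i
--     # (all indices of one whitespace run share the pre-collapse length).
--     out = []
--     pos_map = []
--     prev_space = False
--     run_base = 0
--     for ch in context:
--         if ch.isspace():
--             if not prev_space:
--                 run_base = len(out)
--                 if out and out[-1] != " ":
--                     out.append(" ")
--             pos_map.append(run_base)
--             prev_space = True
--         else:
--             pos_map.append(len(out))
--             out.append(ch)
--             prev_space = False
--     pos_map.append(len(out))
--
--     norm_start = pos_map[rel_start]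
--     norm_end = pos_map[rel_end]
--
--     s = "".join(out)
--     trailing_trimmed = s.strip(" ")
--     leading_trim = len(s) - len(s.lstrip(" "))
--
--     norm_start = max(0, norm_start - leading_trim)
--     norm_end = max(norm_start, norm_end - leading_trim)
--     if norm_end > len(trailing_trimmed):
--         norm_end = len(trailing_trimmed)
--     if norm_start > len(trailing_trimmed):
--         norm_start = len(trailing_trimmed)
--     return trailing_trimmed, norm_start, norm_end
-- ===== Notes on version B (the rewrite author's own statement) =====
-- stated objective: simpler
-- what changed: Replaces the interleaved while-loop with inner run-skipping loop and None-sentinel span tracking by a single per-character pass that builds the normalized text together with a full position map pos_map (length len(context)+1), after which both span positions are plain lookups pos_map[rel_start] / pos_map[rel_end]; the trim/clamp epilogue is kept.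
import Mathlib
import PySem

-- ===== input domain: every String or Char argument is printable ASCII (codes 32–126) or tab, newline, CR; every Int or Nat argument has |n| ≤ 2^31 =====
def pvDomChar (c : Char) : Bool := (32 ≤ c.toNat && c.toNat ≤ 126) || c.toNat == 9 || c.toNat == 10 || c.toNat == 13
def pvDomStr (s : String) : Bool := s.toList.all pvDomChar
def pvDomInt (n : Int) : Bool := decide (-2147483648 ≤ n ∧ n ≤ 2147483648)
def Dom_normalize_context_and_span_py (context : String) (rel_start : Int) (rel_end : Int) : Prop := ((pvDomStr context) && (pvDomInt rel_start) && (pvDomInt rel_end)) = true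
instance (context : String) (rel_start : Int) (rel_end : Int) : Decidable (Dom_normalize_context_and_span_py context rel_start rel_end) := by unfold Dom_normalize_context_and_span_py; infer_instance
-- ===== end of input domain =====

-- B replaces A's run-skipping while-loop with None sentinels by one per-character
-- pass that also builds a position map; span positions become two lookups.
-- Equivalence of the RETURN value on Pre_ (where A does not raise ValueError).

-- ===== shared epilogue helpers (both Pythons contain this block verbatim) =====
-- s.lstrip(" ") on code points (exact: drops leading ' ' only)
def pyLstripSp (cs : List Char) : List Char := cs.dropWhile (· == ' ')
-- s.strip(" ") on code points (exact: drops leading and trailing ' ' only)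
def pyStripSp (cs : List Char) : List Char :=
  ((cs.dropWhile (· == ' ')).reverse.dropWhile (· == ' ')).reverse
-- the common final trim/clamp block of both Pythons
def nrmFinish (out : List Char) (ns ne : Int) : String × Int × Int :=
  let leading_trim : Int := (out.length : Int) - ((pyLstripSp out).length : Int)
  let tt := pyStripSp out
  let ns1 := max 0 (ns - leading_trim)
  let ne1 := max ns1 (ne - leading_trim)
  let ne2 := if ne1 > (tt.length : Int) then (tt.length : Int) else ne1
  let ns2 := if ns1 > (tt.length : Int) then (tt.length : Int) else ns1
  (String.mk tt, ns2, ne2)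

-- ===== PORT A =====
-- inner `while j < len(context) and context[j].isspace(): ...` loop
def aInner (ctx : List Char) (rs re_ : Int) (j : Nat) (ol : Int)
    (ns ne : Option Int) : Nat × Option Int × Option Int :=
  if h : j < ctx.length then
    if PySem.Chars.isspace ctx[j] then
      aInner ctx rs re_ (j+1) ol
        (if (j : Int) = rs ∧ ns = none then some ol else ns)
        (if (j : Int) = re_ ∧ ne = none then some ol else ne)
    else (j, ns, ne)
  else (j, ns, ne)
termination_by ctx.length - j
decreasing_by exact Nat.sub_succ_lt_self _ _ h

lemma aInner_fst_ge (ctx : List Char) (rs re_ : Int) (j : Nat) (ol : Int)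
    (ns ne : Option Int) : j ≤ (aInner ctx rs re_ j ol ns ne).1 := by
  induction j, ns, ne using aInner.induct (ctx := ctx) (rs := rs) (re_ := re_) (ol := ol) with
  | case1 j ns ne h hsp ih =>
      rw [aInner, dif_pos h, if_pos hsp]
      exact Nat.le_trans (Nat.le_succ j) ih
  | case2 j ns ne h hsp => rw [aInner, dif_pos h, if_neg hsp]
  | case3 j ns ne h => rw [aInner, dif_neg h]

lemma aInner_fst_gt (ctx : List Char) (rs re_ : Int) (j : Nat) (ol : Int)
    (ns ne : Option Int) (h : j < ctx.length) (hsp : PySem.Chars.isspace ctx[j]) :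
    j < (aInner ctx rs re_ j ol ns ne).1 := by
  rw [aInner, dif_pos h, if_pos hsp]
  exact Nat.lt_of_lt_of_le (Nat.lt_succ_self j) (aInner_fst_ge ctx rs re_ (j+1) ol _ _)

-- outer `while i < len(context): ...` loop
def aLoop (ctx : List Char) (rs re_ : Int) (i : Nat) (out : List Char) (ol : Int)
    (ns ne : Option Int) : List Char × Int × Option Int × Option Int :=
  if h : i < ctx.length then
    let ns1 := if (i : Int) = rs then some ol else ns
    let ne1 := if (i : Int) = re_ then some ol else ne
    if hsp : PySem.Chars.isspace ctx[i] then
      let r := aInner ctx rs re_ i ol ns1 ne1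
      let p := if out ≠ [] ∧ out.getLast? ≠ some ' ' then (out ++ [' '], ol + 1) else (out, ol)
      aLoop ctx rs re_ r.1 p.1 p.2 r.2.1 r.2.2
    else
      aLoop ctx rs re_ (i+1) (out ++ [ctx[i]]) (ol + 1) ns1 ne1
  else (out, ol, ns, ne)
termination_by ctx.length - i
decreasing_by
  · exact Nat.sub_lt_sub_left h (aInner_fst_gt ctx rs re_ i ol _ _ h hsp)
  · exact Nat.sub_succ_lt_self _ _ h

-- port of A (`_normalize_context_and_span`); on inputs where A raises ValueError
-- (excluded by Pre_) it returns ("", 0, 0)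
def normalize_context_and_span_py (context : String) (rel_start : Int) (rel_end : Int) :
    String × Int × Int :=
  let ctx := context.toList
  if rel_start < 0 ∨ rel_end < rel_start ∨ rel_end > (ctx.length : Int) then ("", 0, 0)
  else
    let r := aLoop ctx rel_start rel_end 0 [] 0 none none
    let out := r.1
    let ol := r.2.1
    let ns : Int := match r.2.2.1 with
      | some v => v
      | none => if rel_start = (ctx.length : Int) then ol else 0
    let ne : Int := match r.2.2.2 with
      | some v => v
      | none => if rel_end = (ctx.length : Int) then ol else ns
    nrmFinish out ns ne

-- ===== PORT B =====
-- one per-character step: state (out, pos_map, prev_space, run_base)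
def bStep (st : List Char × List Int × Bool × Int) (ch : Char) :
    List Char × List Int × Bool × Int :=
  let (out, pm, prev, rb) := st
  if PySem.Chars.isspace ch then
    if prev then (out, pm ++ [rb], true, rb)
    else
      let rb' : Int := out.length
      let out' := if out ≠ [] ∧ out.getLast? ≠ some ' ' then out ++ [' '] else out
      (out', pm ++ [rb'], true, rb')
  else (out ++ [ch], pm ++ [(out.length : Int)], false, rb)

-- port of B; same ValueError guard, same placeholder outside Pre_
def normalize_context_and_span_py_alt (context : String) (rel_start : Int) (rel_end : Int) :
    String × Int × Int :=
  let ctx := context.toList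
  if rel_start < 0 ∨ rel_end < rel_start ∨ rel_end > (ctx.length : Int) then ("", 0, 0)
  else
    let st := ctx.foldl bStep ([], [], false, 0)
    let out := st.1
    let pm := st.2.1 ++ [(out.length : Int)]
    -- Pre_ guarantees the two indices are in range, so the IndexError default is never used
    let ns : Int := (PySem.List.pyGet? pm rel_start).getD 0
    let ne : Int := (PySem.List.pyGet? pm rel_end).getD 0
    nrmFinish out ns ne

-- ===== PRECONDITION & SPEC =====
-- Pre_: exactly the inputs on which A returns (A raises ValueError otherwise)
def Pre_normalize_context_and_span_py (context : String) (rel_start : Int) (rel_end : Int) : Prop :=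
  0 ≤ rel_start ∧ rel_start ≤ rel_end ∧ rel_end ≤ (context.toList.length : Int)
instance (context : String) (rel_start : Int) (rel_end : Int) : Decidable (Pre_normalize_context_and_span_py context rel_start rel_end) := by unfold Pre_normalize_context_and_span_py; infer_instance

def pvWitness_normalize_context_and_span_py : String × Int × Int := ("ab  cd", 1, 5)

def Spec_normalize_context_and_span_py (context : String) (rel_start : Int) (rel_end : Int) (out : String × Int × Int) : Prop := out = normalize_context_and_span_py_alt context rel_start rel_end
instance (context : String) (rel_start : Int) (rel_end : Int) (out : String × Int × Int) : Decidable (Spec_normalize_context_and_span_py context rel_start rel_end out) := by unfold Spec_normalize_context_and_span_py; infer_instance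

-- ===== CLAIM (what is proved, stated in full; the proofs are below) =====
def Claim_equal_normalize_context_and_span_py : Prop := ∀ (context : String) (rel_start : Int) (rel_end : Int), Dom_normalize_context_and_span_py context rel_start rel_end → Pre_normalize_context_and_span_py context rel_start rel_end → Spec_normalize_context_and_span_py context rel_start rel_end (normalize_context_and_span_py context rel_start rel_end)

-- ===== LEMMAS AND PROOFS =====

-- span value A's sentinels amount to: a lookup in the position map built so far
def nsSpec (pm : List Int) (x : Int) : Option Int :=
  if 0 ≤ x ∧ x < (pm.length : Int) then pm[x.toNat]? else none

-- end of the whitespace run starting at j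
def runEnd (ctx : List Char) (j : Nat) : Nat :=
  if h : j < ctx.length then
    if PySem.Chars.isspace ctx[j] then runEnd ctx (j+1) else j
  else j
termination_by ctx.length - j
decreasing_by exact Nat.sub_succ_lt_self _ _ h

lemma runEnd_ge (ctx : List Char) (j : Nat) : j ≤ runEnd ctx j := by
  induction j using runEnd.induct (ctx := ctx) with
  | case1 j h hsp ih => rw [runEnd, dif_pos h, if_pos hsp]; omega
  | case2 j h hsp => rw [runEnd, dif_pos h, if_neg hsp]
  | case3 j h => rw [runEnd, dif_neg h]

lemma runEnd_le (ctx : List Char) (j : Nat) (hj : j ≤ ctx.length) : runEnd ctx j ≤ ctx.length := by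
  induction j using runEnd.induct (ctx := ctx) with
  | case1 j h hsp ih => rw [runEnd, dif_pos h, if_pos hsp]; exact ih h
  | case2 j h hsp => rw [runEnd, dif_pos h, if_neg hsp]; exact hj
  | case3 j h => rw [runEnd, dif_neg h]; exact hj

lemma runEnd_not_space (ctx : List Char) (j : Nat) :
    ∀ c, ctx[runEnd ctx j]? = some c → PySem.Chars.isspace c = false := by
  induction j using runEnd.induct (ctx := ctx) with
  | case1 j hh hsp ih =>
      rw [runEnd, dif_pos hh, if_pos hsp]; exact ih
  | case2 j hh hsp =>
      rw [runEnd, dif_pos hh, if_neg hsp]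
      intro c hc
      rw [List.getElem?_eq_getElem hh] at hc
      cases hc
      simpa using hsp
  | case3 j hh =>
      rw [runEnd, dif_neg hh]
      intro c hc
      rw [List.getElem?_eq_none_iff.mpr (by omega)] at hc
      cases hc

lemma runEnd_spaces (ctx : List Char) (j : Nat) :
    ∀ m (h1 : j ≤ m) (h2 : m < runEnd ctx j) (hm : m < ctx.length),
      PySem.Chars.isspace (ctx[m]'hm) = true := by
  induction j using runEnd.induct (ctx := ctx) with
  | case1 j hh hsp ih =>
      intro m h1 h2 hm
      rw [runEnd, dif_pos hh, if_pos hsp] at h2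
      rcases Nat.eq_or_lt_of_le h1 with rfl | h1'
      · exact hsp
      · exact ih m h1' h2 hm
  | case2 j hh hsp => intro m h1 h2 hm; rw [runEnd, dif_pos hh, if_neg hsp] at h2; omega
  | case3 j hh => intro m h1 h2 hm; rw [runEnd, dif_neg hh] at h2; omega

-- A's inner loop = advance to runEnd, setting unset sentinels inside the run to ol
lemma aInner_spec (ctx : List Char) (rs re_ : Int) (ol : Int) :
    ∀ j (ns ne : Option Int),
      aInner ctx rs re_ j ol ns ne =
        (runEnd ctx j,
         (if ns = none ∧ (j : Int) ≤ rs ∧ rs < (runEnd ctx j : Int) then some ol else ns),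
         (if ne = none ∧ (j : Int) ≤ re_ ∧ re_ < (runEnd ctx j : Int) then some ol else ne)) := by
  intro j ns ne
  induction j, ns, ne using aInner.induct (ctx := ctx) (rs := rs) (re_ := re_) (ol := ol) with
  | case1 j ns ne h hsp ih =>
      have hre : runEnd ctx j = runEnd ctx (j+1) := by rw [runEnd, dif_pos h, if_pos hsp]
      simp only [dite_eq_ite] at ih
      rw [aInner, dif_pos h, if_pos hsp, ih, hre]
      have hge := runEnd_ge ctx (j+1)
      simp only [Prod.mk.injEq, true_and]
      constructor
      · rcases ns with _ | v
        · split <;> split <;> simp_all <;> omega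
        · split <;> split <;> simp_all
      · rcases ne with _ | v
        · split <;> split <;> simp_all <;> omega
        · split <;> split <;> simp_all
  | case2 j ns ne h hsp =>
      rw [aInner, dif_pos h, if_neg hsp, runEnd, dif_pos h, if_neg hsp]
      simp only [Prod.mk.injEq]
      refine ⟨trivial, ?_, ?_⟩ <;> · split <;> [omega; rfl]
  | case3 j ns ne h =>
      rw [aInner, dif_neg h, runEnd, dif_neg h]
      simp only [Prod.mk.injEq]
      refine ⟨trivial, ?_, ?_⟩ <;> · split <;> [omega; rfl]

-- B over a run tail (prev_space already true): each space char appends run_base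
lemma bRun_spec (ctx : List Char) (out : List Char) (rb : Int) :
    ∀ (k j : Nat) (pm : List Int), j + k ≤ ctx.length →
      (∀ m (h1 : j ≤ m) (h2 : m < j + k) (hm : m < ctx.length), PySem.Chars.isspace (ctx[m]'hm) = true) →
      ((ctx.drop j).take k).foldl bStep (out, pm, true, rb) =
        (out, pm ++ List.replicate k rb, true, rb) := by
  intro k
  induction k with
  | zero => intro j pm _ _; simp
  | succ k ih =>
      intro j pm hle hsp
      have hj : j < ctx.length := by omega
      have hdrop : ctx.drop j = ctx[j] :: ctx.drop (j+1) := List.drop_eq_getElem_cons hj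
      rw [hdrop]
      simp only [List.take_succ_cons, List.foldl_cons]
      have hspj : PySem.Chars.isspace ctx[j] = true := hsp j (le_refl j) (by omega) hj
      have hstep : bStep (out, pm, true, rb) ctx[j] = (out, pm ++ [rb], true, rb) := by
        simp [bStep, hspj]
      rw [hstep, ih (j+1) (pm ++ [rb]) (by omega)
        (fun m h1 h2 hm => hsp m (by omega) (by omega) hm)]
      simp [List.replicate_succ]

-- pm lookups agree after appending the run block / a single entry
lemma nsSpec_append_replicate (pm : List Int) (k : Nat) (v : Int) (x : Int) :
    nsSpec (pm ++ List.replicate k v) x =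
      if 0 ≤ x ∧ x < (pm.length : Int) then pm[x.toNat]?
      else if (pm.length : Int) ≤ x ∧ x < (pm.length : Int) + k then some v
      else none := by
  unfold nsSpec
  by_cases h1 : 0 ≤ x ∧ x < (pm.length : Int)
  · rw [if_pos h1]
    rw [if_pos (by simp; omega)]
    have : x.toNat < pm.length := by omega
    rw [List.getElem?_append_left this]
  · rw [if_neg h1]
    by_cases h2 : (pm.length : Int) ≤ x ∧ x < (pm.length : Int) + k
    · rw [if_pos h2, if_pos (by simp; omega)]
      have hge : pm.length ≤ x.toNat := by omega
      rw [List.getElem?_append_right hge]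
      rw [List.getElem?_replicate]
      rw [if_pos (by omega)]
    · rw [if_neg h2]
      rw [if_neg (by simp; omega)]

-- the main simulation: A's outer loop against B's fold over the remaining suffix
lemma bFold_pm_len : ∀ (l : List Char) (st : List Char × List Int × Bool × Int),
    ((l.foldl bStep st).2.1).length = st.2.1.length + l.length := by
  intro l
  induction l with
  | nil => intro st; simp
  | cons c t ih =>
      intro st
      obtain ⟨out, pm, prev, rb⟩ := st
      rw [List.foldl_cons, ih]
      have : (bStep (out, pm, prev, rb) c).2.1.length = pm.length + 1 := by
        simp only [bStep]
        split
        · split <;> simp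
        · simp
      simp [this]; omega

-- the single-entry append A performs at a non-space character
lemma nsSpec_snoc (pm : List Int) (i : Nat) (hpm : pm.length = i) (ol x : Int) :
    (if (i : Int) = x then some ol else nsSpec pm x) = nsSpec (pm ++ [ol]) x := by
  unfold nsSpec
  have hlen : (pm ++ [ol]).length = pm.length + 1 := by simp
  rw [hlen]
  by_cases hx : (i : Int) = x
  · rw [if_pos hx, if_pos (by omega)]
    rw [List.getElem?_append_right (by omega)]
    have h0 : x.toNat - pm.length = 0 := by omega
    rw [h0]
    rfl
  · rw [if_neg hx]
    by_cases h1 : 0 ≤ x ∧ x < (pm.length : Int)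
    · rw [if_pos h1, if_pos (by omega)]
      rw [List.getElem?_append_left (by omega)]
    · rw [if_neg h1, if_neg (by omega)]

-- the combined outer-assignment + inner-loop update at a whitespace run of length k+1
lemma nsSpec_step (pm : List Int) (i k : Nat) (hpm : pm.length = i) (ol x : Int) :
    (if (if (i : Int) = x then some ol else nsSpec pm x) = none ∧
        (i : Int) ≤ x ∧ x < ((i + 1 + k : Nat) : Int)
     then some ol else (if (i : Int) = x then some ol else nsSpec pm x)) =
      nsSpec (pm ++ List.replicate (k + 1) ol) x := by
  rw [nsSpec_append_replicate]
  by_cases hx : (i : Int) = x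
  · rw [if_pos hx]
    rw [if_neg (by simp)]
    rw [if_neg (by omega), if_pos (by push_cast; omega)]
  · rw [if_neg hx]
    unfold nsSpec
    by_cases h1 : 0 ≤ x ∧ x < (pm.length : Int)
    · rw [if_pos h1, if_pos h1]
      have hlt : x.toNat < pm.length := by omega
      rw [List.getElem?_eq_getElem hlt]
      rw [if_neg (by simp)]
    · rw [if_neg h1, if_neg h1]
      have hiff : ((none : Option Int) = none ∧ (i : Int) ≤ x ∧ x < ((i + 1 + k : Nat) : Int)) ↔
          ((pm.length : Int) ≤ x ∧ x < (pm.length : Int) + ((k + 1 : Nat) : Int)) := by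
        constructor
        · rintro ⟨-, ha, hb⟩; push_cast at *; omega
        · rintro ⟨ha, hb⟩; refine ⟨rfl, ?_, ?_⟩ <;> (push_cast at *; omega)
      rw [if_congr hiff rfl rfl]

lemma loop_sim (ctx : List Char) (rs re_ : Int) :
    ∀ (n i : Nat) (out : List Char) (pm : List Int) (prev : Bool) (rb : Int),
      ctx.length - i ≤ n → pm.length = i → i ≤ ctx.length →
      (prev = true → ∀ c, ctx[i]? = some c → PySem.Chars.isspace c = false) →
      aLoop ctx rs re_ i out (out.length : Int) (nsSpec pm rs) (nsSpec pm re_) =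
        (((ctx.drop i).foldl bStep (out, pm, prev, rb)).1,
         ((((ctx.drop i).foldl bStep (out, pm, prev, rb)).1.length : Int)),
         nsSpec (((ctx.drop i).foldl bStep (out, pm, prev, rb)).2.1) rs,
         nsSpec (((ctx.drop i).foldl bStep (out, pm, prev, rb)).2.1) re_) := by
  intro n
  induction n with
  | zero =>
      intro i out pm prev rb hn hpm hle _
      have hi : i = ctx.length := by omega
      subst hi
      rw [aLoop, dif_neg (by omega)]
      simp
  | succ n ih =>
      intro i out pm prev rb hn hpm hle hprev
      by_cases h : i < ctx.length
      · have hdrop : ctx.drop i = ctx[i] :: ctx.drop (i+1) := List.drop_eq_getElem_cons h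
        rw [aLoop, dif_pos h]
        by_cases hsp : PySem.Chars.isspace ctx[i] = true
        · -- whitespace run starting at i
          rw [dif_pos hsp]
          have hpf : prev = false := by
            cases prev
            · rfl
            · exact absurd (hprev rfl ctx[i] (List.getElem?_eq_getElem h)) (by simp [hsp])
          subst hpf
          have hre : runEnd ctx i = runEnd ctx (i+1) := by
            rw [runEnd, dif_pos h, if_pos hsp]
          have he1 : i + 1 ≤ runEnd ctx (i+1) := runEnd_ge ctx (i+1)
          have he2 : runEnd ctx (i+1) ≤ ctx.length := runEnd_le ctx (i+1) (by omega)
          have hkk : i + 1 + (runEnd ctx (i+1) - (i+1)) ≤ ctx.length := by omega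
          simp only [aInner_spec, hre]
          have hstep1 : bStep (out, pm, false, rb) ctx[i] =
              ((if out ≠ [] ∧ out.getLast? ≠ some ' ' then out ++ [' '] else out),
               pm ++ [(out.length : Int)], true, (out.length : Int)) := by
            simp only [bStep, if_pos hsp]; rfl
          have hsplit : ctx.drop (i+1) =
              ((ctx.drop (i+1)).take (runEnd ctx (i+1) - (i+1))) ++ ctx.drop (runEnd ctx (i+1)) := by
            conv_lhs => rw [← List.take_append_drop (runEnd ctx (i+1) - (i+1)) (ctx.drop (i+1))]
            rw [List.drop_drop]
            have hx : i + 1 + (runEnd ctx (i+1) - (i+1)) = runEnd ctx (i+1) := by omega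
            rw [hx]
          rw [hdrop]
          simp only [List.foldl_cons, hstep1]
          rw [hsplit, List.foldl_append]
          rw [bRun_spec ctx _ _ (runEnd ctx (i+1) - (i+1)) (i+1) _ hkk
            (fun m h1 h2 hm => runEnd_spaces ctx (i+1) m h1 (by omega) hm)]
          have harr : pm ++ [(out.length : Int)] ++ List.replicate (runEnd ctx (i+1) - (i+1)) (out.length : Int) =
              pm ++ List.replicate ((runEnd ctx (i+1) - (i+1)) + 1) (out.length : Int) := by
            rw [List.append_assoc]
            congr 1
          rw [harr]
          have hout : (if out ≠ [] ∧ out.getLast? ≠ some ' '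
              then (out ++ [' '], (out.length : Int) + 1) else (out, (out.length : Int))) =
              (((if out ≠ [] ∧ out.getLast? ≠ some ' ' then out ++ [' '] else out)),
               (((if out ≠ [] ∧ out.getLast? ≠ some ' ' then out ++ [' '] else out).length : Int))) := by
            split <;> simp
          rw [hout]
          have hns := nsSpec_step pm i (runEnd ctx (i+1) - (i+1)) hpm (out.length : Int) rs
          have hne := nsSpec_step pm i (runEnd ctx (i+1) - (i+1)) hpm (out.length : Int) re_
          have hik : i + 1 + (runEnd ctx (i+1) - (i+1)) = runEnd ctx (i+1) := by omega
          rw [hik] at hns hne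
          rw [hns, hne]
          exact ih (runEnd ctx (i+1)) _ _ true (out.length : Int) (by omega)
            (by rw [List.length_append, List.length_replicate, hpm]; omega) he2
            (fun _ c hc => runEnd_not_space ctx (i+1) c hc)
        · -- ordinary character
          rw [dif_neg hsp]
          rw [hdrop]
          simp only [List.foldl_cons]
          have hstep : bStep (out, pm, prev, rb) ctx[i] =
              (out ++ [ctx[i]], pm ++ [(out.length : Int)], false, rb) := by
            simp only [bStep, if_neg hsp]
          rw [hstep]
          have hns := nsSpec_snoc pm i hpm (out.length : Int) rs
          have hne := nsSpec_snoc pm i hpm (out.length : Int) re_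
          rw [hns, hne]
          have hlen : (out.length : Int) + 1 = ((out ++ [ctx[i]]).length : Int) := by
            simp
          rw [hlen]
          exact ih (i+1) _ _ false rb (by omega) (by simp [hpm]) (by omega)
            (by simp)
      · have hi : i = ctx.length := by omega
        subst hi
        rw [aLoop, dif_neg (by omega)]
        simp

-- reading the two span positions off the completed position map
lemma pyGetD_of_nsSpec_some (pm : List Int) (L x v : Int) (h : nsSpec pm x = some v) :
    (PySem.List.pyGet? (pm ++ [L]) x).getD 0 = v := by
  unfold nsSpec at h
  by_cases h1 : 0 ≤ x ∧ x < (pm.length : Int)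
  · rw [if_pos h1] at h
    have hxn : x = ((x.toNat : Nat) : Int) := by omega
    rw [hxn, PySem.List.pyGet?_natCast]
    rw [List.getElem?_append_left (by omega)]
    rw [h]
    rfl
  · rw [if_neg h1] at h
    simp at h

lemma pyGetD_of_nsSpec_none (pm : List Int) (L x : Int) (hx0 : 0 ≤ x)
    (hx1 : x ≤ (pm.length : Int)) (h : nsSpec pm x = none) :
    (PySem.List.pyGet? (pm ++ [L]) x).getD 0 = L ∧ x = (pm.length : Int) := by
  unfold nsSpec at h
  by_cases h1 : 0 ≤ x ∧ x < (pm.length : Int)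
  · obtain ⟨h1a, h1b⟩ := h1
    rw [if_pos ⟨h1a, h1b⟩, List.getElem?_eq_getElem (by omega)] at h
    simp at h
  · have hxe : x = (pm.length : Int) := by omega
    refine ⟨?_, hxe⟩
    have hxn : x = ((x.toNat : Nat) : Int) := by omega
    rw [hxn, PySem.List.pyGet?_natCast]
    rw [List.getElem?_append_right (by omega)]
    have h0 : x.toNat - pm.length = 0 := by omega
    rw [h0]
    rfl

-- ===== VERDICT (by name: the statement is the Claim_ definition above) =====
theorem normalize_context_and_span_py_spec : Claim_equal_normalize_context_and_span_py := by
  intro context rs re_ _ hpre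
  unfold Spec_normalize_context_and_span_py
  obtain ⟨h0, h1, h2⟩ := hpre
  unfold normalize_context_and_span_py normalize_context_and_span_py_alt
  set ctx := context.toList with hctx
  have hc : ¬ (rs < 0 ∨ re_ < rs ∨ re_ > (ctx.length : Int)) := by
    omega
  rw [if_neg hc, if_neg hc]
  have hmain := loop_sim ctx rs re_ ctx.length 0 [] [] false 0 (by omega) rfl (by omega) (by simp)
  rw [show nsSpec ([] : List Int) rs = none from by simp [nsSpec],
      show nsSpec ([] : List Int) re_ = none from by simp [nsSpec]] at hmain
  simp only [List.drop_zero, List.length_nil, Nat.cast_zero] at hmain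
  rw [hmain]
  set st := ctx.foldl bStep ([], [], false, 0) with hst
  have hpml : st.2.1.length = ctx.length := by
    rw [hst, bFold_pm_len]; simp
  have hrs1 : rs ≤ (st.2.1.length : Int) := by rw [hpml]; omega
  have hre1 : re_ ≤ (st.2.1.length : Int) := by rw [hpml]; omega
  rcases hNS : nsSpec st.2.1 rs with _ | v <;>
    rcases hNE : nsSpec st.2.1 re_ with _ | w <;>
    dsimp only
  · obtain ⟨hb, hxe⟩ := pyGetD_of_nsSpec_none st.2.1 (st.1.length : Int) rs h0 hrs1 hNS
    obtain ⟨hb', hxe'⟩ := pyGetD_of_nsSpec_none st.2.1 (st.1.length : Int) re_ (by omega) hre1 hNE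
    rw [hb, hb', ← hpml, if_pos hxe, if_pos hxe']
  · -- rs past the map but re_ inside it contradicts rs ≤ re_
    obtain ⟨hb, hxe⟩ := pyGetD_of_nsSpec_none st.2.1 (st.1.length : Int) rs h0 hrs1 hNS
    exfalso
    unfold nsSpec at hNE
    rw [if_neg (by omega)] at hNE
    simp at hNE
  · have hb := pyGetD_of_nsSpec_some st.2.1 (st.1.length : Int) rs v hNS
    obtain ⟨hb', hxe'⟩ := pyGetD_of_nsSpec_none st.2.1 (st.1.length : Int) re_ (by omega) hre1 hNE
    rw [hb, hb', ← hpml, if_pos hxe']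
  · have hb := pyGetD_of_nsSpec_some st.2.1 (st.1.length : Int) rs v hNS
    have hb' := pyGetD_of_nsSpec_some st.2.1 (st.1.length : Int) re_ w hNE
    rw [hb, hb']
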